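-- pv_equiv track=rewrite | github.com/th4t-gi/p-adic-gases | data-analysis/tree_viz.py | prufer_seq_to_degrees
-- ===== SOURCE A (Python) =====
-- from typing import List, Dict, Set
--
-- def prufer_seq_to_degrees(N: int, seq: List[int]) -> List[int]:
--     # add implied final edge
--     seq = seq.copy()
--     seq.append(max(seq))
--     # initialize things
--     prufer_set = sorted(set(seq))
--     degrees = [0] * len(prufer_set)
--
--     for i, node in enumerate(prufer_set):
--         degrees[i] = seq.count(node)
--
--     return degrees[::-1]
-- ===== SOURCE B (Python) =====
-- def prufer_seq_to_degrees(N, seq):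
--     # sort the augmented multiset once (descending) and do one run-length pass over it,
--     # instead of A's per-distinct-value rescan with seq.count
--     aug = sorted(seq + [max(seq)], reverse=True)
--     counts = []
--     run = 1
--     for prev, cur in zip(aug, aug[1:]):
--         if cur == prev:
--             run += 1
--         else:
--             counts.append(run)
--             run = 1
--     counts.append(run)
--     return counts
-- ===== Notes on version B (the rewrite author's own statement) =====
-- stated objective: faster
-- what changed: A builds the sorted set of distinct values and rescans the whole augmented sequence with seq.count for each of them; B sorts the augmented multiset once (descending) and computes the degrees as the run lengths of a single linear pass over the sorted data, so the per-value rescan and the distinct-value set disappear.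
import Mathlib
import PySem

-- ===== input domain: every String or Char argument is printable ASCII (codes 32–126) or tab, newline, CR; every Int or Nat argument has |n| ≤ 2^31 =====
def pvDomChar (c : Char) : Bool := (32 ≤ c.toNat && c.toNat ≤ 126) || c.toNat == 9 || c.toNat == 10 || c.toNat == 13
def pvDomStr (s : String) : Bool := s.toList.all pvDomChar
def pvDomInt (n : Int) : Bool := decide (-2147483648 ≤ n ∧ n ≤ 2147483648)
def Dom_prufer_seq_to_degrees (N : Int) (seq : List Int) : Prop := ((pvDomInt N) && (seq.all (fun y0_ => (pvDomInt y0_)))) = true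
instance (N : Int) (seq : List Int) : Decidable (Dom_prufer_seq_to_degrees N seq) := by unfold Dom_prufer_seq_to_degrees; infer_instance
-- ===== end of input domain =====

-- B sorts the augmented multiset once (descending) and reads the degrees off as run lengths
-- in a single linear pass, replacing A's per-distinct-value rescan with seq.count.

-- ===== PORT A =====
-- literal transliteration of A: append max(seq), sort the distinct values,
-- fill degrees[i] = seq.count(node) by index assignment, return degrees[::-1]
def prufer_seq_to_degrees (N : Int) (seq : List Int) : List Int :=
  match PySem.List.max? seq (fun y => y) with
  | none => []  -- unreachable under Pre_: max([]) raises ValueError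
  | some m =>
    let seq2 := seq ++ [m]
    let pruferSet := PySem.List.sorted (PySem.Set.ofList seq2) (fun y => y)
    let degrees : List Int := List.replicate pruferSet.length 0
    let degrees := ((List.range pruferSet.length).zip pruferSet).foldl
      (fun d (p : Nat × Int) => d.set p.1 ((PySem.List.count seq2 p.2 : Nat) : Int)) degrees
    -- degrees[::-1]; slice? is none only for step 0, so getD [] is exact here
    (PySem.List.slice? degrees none none (-1)).getD []

-- ===== PORT B =====
-- literal transliteration of B: sort seq + [max(seq)] descending, then one
-- run-length pass over zip(aug, aug[1:]) with state (counts, run)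
def prufer_seq_to_degrees_alt (N : Int) (seq : List Int) : List Int :=
  match PySem.List.max? seq (fun y => y) with
  | none => []  -- unreachable under Pre_: max([]) raises ValueError
  | some m =>
    let aug := PySem.List.sorted (seq ++ [m]) (fun y => y) true
    let st := (aug.zip (PySem.List.slice aug (some 1) none)).foldl
      (fun (st : List Int × Int) (p : Int × Int) =>
        if p.2 == p.1 then (st.1, st.2 + 1) else (st.1 ++ [st.2], 1))
      ([], (1 : Int))
    st.1 ++ [st.2]

-- ===== PRECONDITION & SPEC =====
-- Pre_ excludes exactly the empty sequence, on which both A and B raise ValueError via max(seq)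
def Pre_prufer_seq_to_degrees (N : Int) (seq : List Int) : Prop := seq ≠ []
instance (N : Int) (seq : List Int) : Decidable (Pre_prufer_seq_to_degrees N seq) := by
  unfold Pre_prufer_seq_to_degrees; infer_instance

def pvWitness_prufer_seq_to_degrees : Int × List Int := (5, [2, 0, 2])

def Spec_prufer_seq_to_degrees (N : Int) (seq : List Int) (out : List Int) : Prop :=
  out = prufer_seq_to_degrees_alt N seq
instance (N : Int) (seq : List Int) (out : List Int) : Decidable (Spec_prufer_seq_to_degrees N seq out) := by
  unfold Spec_prufer_seq_to_degrees; infer_instance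

-- ===== CLAIM (what is proved, stated in full; the proofs are below) =====
def Claim_equal_prufer_seq_to_degrees : Prop := ∀ (N : Int) (seq : List Int), Dom_prufer_seq_to_degrees N seq → Pre_prufer_seq_to_degrees N seq → Spec_prufer_seq_to_degrees N seq (prufer_seq_to_degrees N seq)

-- ===== LEMMAS AND PROOFS =====

-- the run-length recursion B's fold computes (current value, current run, rest of the list)
def gRun (cur run : Int) : List Int → List Int
  | [] => [run]
  | x :: xs => if x = cur then gRun cur (run + 1) xs else run :: gRun x 1 xs

-- adjacent dedup of a list, given the previously kept value
def dd' (cur : Int) : List Int → List Int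
  | [] => []
  | x :: xs => if x = cur then dd' cur xs else x :: dd' x xs

-- B's fold over zip(aug, aug[1:]) computes gRun
lemma fold_rle : ∀ (l : List Int) (cur run : Int) (acc : List Int),
    (((cur :: l).zip l).foldl
      (fun (st : List Int × Int) (p : Int × Int) =>
        if p.2 == p.1 then (st.1, st.2 + 1) else (st.1 ++ [st.2], 1)) (acc, run)).1 ++
    [(((cur :: l).zip l).foldl
      (fun (st : List Int × Int) (p : Int × Int) =>
        if p.2 == p.1 then (st.1, st.2 + 1) else (st.1 ++ [st.2], 1)) (acc, run)).2]
    = acc ++ gRun cur run l := by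
  intro l
  induction l with
  | nil => intro cur run acc; simp [gRun]
  | cons x xs ih =>
    intro cur run acc
    by_cases h : x = cur
    · simp only [List.zip_cons_cons, List.foldl_cons, h, beq_self_eq_true, if_true]
      rw [ih cur (run + 1) acc]
      simp [gRun]
    · have hb : (x == cur) = false := by simp [h]
      simp only [List.zip_cons_cons, List.foldl_cons, hb, Bool.false_eq_true, if_false]
      rw [ih x 1 (acc ++ [run])]
      simp [gRun, h]

lemma dd'_subset : ∀ (l : List Int) (cur v : Int), v ∈ dd' cur l → v ∈ l := by
  intro l
  induction l with
  | nil => intro cur v h; simp [dd'] at h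
  | cons x xs ih =>
    intro cur v h
    by_cases hx : x = cur
    · simp only [dd', hx, if_true] at h
      exact List.mem_cons_of_mem _ (ih cur v h)
    · simp only [dd', hx, if_false, List.mem_cons] at h
      rcases h with h | h
      · simp [h]
      · exact List.mem_cons_of_mem _ (ih x v h)

lemma lt_of_mem_dd' : ∀ (l : List Int) (cur : Int),
    List.Pairwise (fun a b : Int => b ≤ a) (cur :: l) → ∀ v ∈ dd' cur l, v < cur := by
  intro l
  induction l with
  | nil => intro cur _ v h; simp [dd'] at h
  | cons x xs ih =>
    intro cur hpw v hv
    have hcx : x ≤ cur := (List.pairwise_cons.mp hpw).1 x (List.mem_cons_self)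
    by_cases hx : x = cur
    · simp only [dd', hx, if_true] at hv
      have : List.Pairwise (fun a b : Int => b ≤ a) (cur :: xs) := by
        have hsub : (cur :: xs).Sublist (cur :: x :: xs) := by
          exact List.Sublist.cons₂ cur (List.sublist_cons_self x xs)
        exact hpw.sublist hsub
      exact ih cur this v hv
    · have hlt : x < cur := lt_of_le_of_ne hcx hx
      simp only [dd', hx, if_false, List.mem_cons] at hv
      rcases hv with rfl | hv
      · exact hlt
      · have hpx : List.Pairwise (fun a b : Int => b ≤ a) (x :: xs) :=
          (List.pairwise_cons.mp hpw).2
        exact lt_trans (ih x hpx v hv) hlt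

lemma mem_dd' : ∀ (l : List Int) (cur : Int),
    List.Pairwise (fun a b : Int => b ≤ a) (cur :: l) →
    ∀ v ∈ l, v = cur ∨ v ∈ dd' cur l := by
  intro l
  induction l with
  | nil => intro cur _ v h; simp at h
  | cons x xs ih =>
    intro cur hpw v hv
    rcases List.mem_cons.mp hv with rfl | hv
    · by_cases hx : v = cur
      · exact Or.inl hx
      · right; simp [dd', hx]
    · by_cases hx : x = cur
      · have : List.Pairwise (fun a b : Int => b ≤ a) (cur :: xs) :=
          hpw.sublist (List.Sublist.cons₂ cur (List.sublist_cons_self x xs))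
        rcases ih cur this v hv with h | h
        · exact Or.inl h
        · right; simpa [dd', hx] using h
      · have hpx : List.Pairwise (fun a b : Int => b ≤ a) (x :: xs) :=
          (List.pairwise_cons.mp hpw).2
        rcases ih x hpx v hv with rfl | h
        · right; simp [dd', hx]
        · right; simp [dd', hx, h]

lemma pairwise_dd' : ∀ (l : List Int) (cur : Int),
    List.Pairwise (fun a b : Int => b ≤ a) (cur :: l) →
    List.Pairwise (fun a b : Int => b < a) (cur :: dd' cur l) := by
  intro l
  induction l with
  | nil => intro cur _; simp [dd']
  | cons x xs ih =>
    intro cur hpw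
    by_cases hx : x = cur
    · have : List.Pairwise (fun a b : Int => b ≤ a) (cur :: xs) :=
        hpw.sublist (List.Sublist.cons₂ cur (List.sublist_cons_self x xs))
      simpa [dd', hx] using ih cur this
    · have hpx : List.Pairwise (fun a b : Int => b ≤ a) (x :: xs) :=
        (List.pairwise_cons.mp hpw).2
      have hcx : x < cur :=
        lt_of_le_of_ne ((List.pairwise_cons.mp hpw).1 x List.mem_cons_self) hx
      have hrec := ih x hpx
      simp only [dd', hx, if_false]
      refine List.pairwise_cons.mpr ⟨?_, hrec⟩
      intro v hv
      rcases List.mem_cons.mp hv with rfl | hv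
      · exact hcx
      · exact lt_trans (lt_of_mem_dd' xs x hpx v hv) hcx

-- run lengths of a nonincreasing list are the counts of its adjacent-dedup values
lemma g_eq : ∀ (l : List Int) (cur run : Int),
    List.Pairwise (fun a b : Int => b ≤ a) (cur :: l) →
    gRun cur run l = (run + (l.count cur : Int)) ::
      (dd' cur l).map (fun v => (l.count v : Int)) := by
  intro l
  induction l with
  | nil => intro cur run _; simp [gRun, dd']
  | cons x xs ih =>
    intro cur run hpw
    by_cases hx : x = cur
    · have hcxs : List.Pairwise (fun a b : Int => b ≤ a) (cur :: xs) :=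
        hpw.sublist (List.Sublist.cons₂ cur (List.sublist_cons_self x xs))
      have := ih cur (run + 1) hcxs
      simp only [gRun, hx, if_true, this, dd', List.count_cons, List.cons.injEq]
      refine ⟨by simp; ring, List.map_congr_left ?_⟩
      intro v hv
      have : v < cur := lt_of_mem_dd' xs cur hcxs v hv
      simp [this.ne']
    · have hpx : List.Pairwise (fun a b : Int => b ≤ a) (x :: xs) :=
        (List.pairwise_cons.mp hpw).2
      have hcx : x < cur :=
        lt_of_le_of_ne ((List.pairwise_cons.mp hpw).1 x List.mem_cons_self) hx
      have hnot : cur ∉ x :: xs := by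
        intro h
        rcases List.mem_cons.mp h with rfl | h
        · exact hx rfl
        · exact absurd ((List.pairwise_cons.mp hpx).1 cur h) (not_le.mpr hcx)
      have := ih x 1 hpx
      simp only [gRun, hx, if_false, this, dd', List.map_cons, List.cons.injEq]
      rw [List.count_eq_zero.mpr hnot]
      refine ⟨by simp, by simp; ring, List.map_congr_left ?_⟩
      intro v hv
      have : v < x := lt_of_mem_dd' xs x hpx v hv
      simp [this.ne']

-- two strictly decreasing Int lists with the same members are equal
lemma eq_of_pairwise_gt : ∀ (l1 l2 : List Int),
    List.Pairwise (fun a b : Int => b < a) l1 →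
    List.Pairwise (fun a b : Int => b < a) l2 →
    (∀ x, x ∈ l1 ↔ x ∈ l2) → l1 = l2 := by
  intro l1
  induction l1 with
  | nil =>
    intro l2 _ _ hm
    cases l2 with
    | nil => rfl
    | cons b t2 => exact absurd ((hm b).mpr List.mem_cons_self) (by simp)
  | cons a t1 ih =>
    intro l2 hp1 hp2 hm
    cases l2 with
    | nil => exact absurd ((hm a).mp List.mem_cons_self) (by simp)
    | cons b t2 =>
      have hab : a = b := by
        have h1 : a ≤ b := by
          rcases List.mem_cons.mp ((hm a).mp List.mem_cons_self) with h | h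
          · exact le_of_eq h
          · exact le_of_lt ((List.pairwise_cons.mp hp2).1 a h)
        have h2 : b ≤ a := by
          rcases List.mem_cons.mp ((hm b).mpr List.mem_cons_self) with h | h
          · exact le_of_eq h
          · exact le_of_lt ((List.pairwise_cons.mp hp1).1 b h)
        omega
      subst hab
      have ht : t1 = t2 := by
        refine ih t2 (List.pairwise_cons.mp hp1).2 (List.pairwise_cons.mp hp2).2 ?_
        intro x
        constructor
        · intro hx
          have hne : x ≠ a := ((List.pairwise_cons.mp hp1).1 x hx).ne
          rcases List.mem_cons.mp ((hm x).mp (List.mem_cons_of_mem _ hx)) with h | h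
          · exact absurd h hne
          · exact h
        · intro hx
          have hne : x ≠ a := ((List.pairwise_cons.mp hp2).1 x hx).ne
          rcases List.mem_cons.mp ((hm x).mpr (List.mem_cons_of_mem _ hx)) with h | h
          · exact absurd h hne
          · exact h
      rw [ht]

-- setting index k of d (k in range) then taking k+1 elements appends the new value to the prefix
lemma take_set_succ : ∀ (d : List Int) (k : Nat) (v : Int), k < d.length →
    (d.set k v).take (k + 1) = d.take k ++ [v] := by
  intro d
  induction d with
  | nil => intro k v h; simp at h
  | cons a t ih =>
    intro k v h
    cases k with
    | zero => simp
    | succ k =>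
      simp only [List.set_cons_succ, List.take_succ_cons, List.cons_append]
      rw [ih k v (by simpa using h)]

-- A's index-assignment loop over enumerate(prufer_set) is a map, for any starting offset
lemma foldl_set_zip_range (f : Int → Int) : ∀ (xs d : List Int) (k : Nat),
    d.length = k + xs.length →
    ((List.range' k xs.length).zip xs).foldl (fun d (p : Nat × Int) => d.set p.1 (f p.2)) d
      = d.take k ++ xs.map f := by
  intro xs
  induction xs with
  | nil =>
    intro d k h
    simp at h
    simp [List.take_of_length_le (le_of_eq h)]
  | cons x t ih =>
    intro d k h
    simp only [List.length_cons] at h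
    have hk : k < d.length := by omega
    simp only [List.length_cons, List.range'_succ]
    simp only [List.zip_cons_cons, List.foldl_cons]
    rw [ih (d.set k (f x)) (k + 1) (by simp; omega)]
    rw [take_set_succ d k (f x) hk]
    simp

-- ===== VERDICT (by name: the statement is the Claim_ definition above) =====
theorem prufer_seq_to_degrees_spec : Claim_equal_prufer_seq_to_degrees := by
  intro N seq _hDom hPre
  unfold Spec_prufer_seq_to_degrees prufer_seq_to_degrees prufer_seq_to_degrees_alt
  cases hmax : PySem.List.max? seq (fun y => y) with
  | none => exact absurd ((PySem.List.max?_eq_none_iff seq (fun y => y)).mp hmax) hPre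
  | some m =>
  simp only []
  set aug := seq ++ [m] with haug
  set asc := PySem.List.sorted (PySem.Set.ofList aug) (fun y => y) with hasc
  set dsc := PySem.List.sorted aug (fun y => y) true with hdsc
  -- A's side: the fill loop is a map, the [::-1] a reverse
  rw [PySem.List.slice?_none_none_neg_one, Option.getD_some]
  rw [List.range_eq_range',
    foldl_set_zip_range (fun v => ((PySem.List.count aug v : Nat) : Int)) asc
      (List.replicate asc.length 0) 0 (by simp)]
  simp only [List.take_zero, List.nil_append, ← List.map_reverse]
  -- B's side: the fold is the run-length recursion on the nonempty descending sort
  rw [PySem.List.slice_from_one]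
  have haugne : aug ≠ [] := by simp [haug]
  have hdscne : dsc ≠ [] := by
    rw [hdsc, Ne, PySem.List.sorted_eq_nil_iff]; exact haugne
  obtain ⟨d0, dt, hd⟩ := List.exists_cons_of_ne_nil hdscne
  have hpw : List.Pairwise (fun a b : Int => b ≤ a) (d0 :: dt) := by
    have := PySem.List.sorted_pairwise_rev aug (fun y => y)
    rw [← hdsc, hd] at this; exact this
  rw [hd]
  show _ = _
  rw [show (d0 :: dt).tail = dt from rfl, fold_rle dt d0 1 [], List.nil_append]
  rw [g_eq dt d0 1 hpw]
  -- both sides are counts of aug over the same strictly decreasing value list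
  have hperm : dsc.Perm aug := PySem.List.sorted_perm aug (fun y => y) true
  rw [hd] at hperm
  have hcount : ∀ v, ((d0 :: dt).count v : Int) = ((PySem.List.count aug v : Nat) : Int) := by
    intro v
    rw [PySem.List.count_eq, hperm.count_eq]
  have hBside : (1 + (dt.count d0 : Int)) :: (dd' d0 dt).map (fun v => (dt.count v : Int))
      = (d0 :: dd' d0 dt).map (fun v => ((PySem.List.count aug v : Nat) : Int)) := by
    simp only [List.map_cons, List.cons.injEq]
    refine ⟨?_, List.map_congr_left ?_⟩
    · rw [← hcount d0]
      simp
      omega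
    · intro v hv
      rw [← hcount v]
      have : v < d0 := lt_of_mem_dd' dt d0 hpw v hv
      simp [this.ne']
  rw [hBside]
  -- the two value lists are the same strictly decreasing list
  have hvals : asc.reverse = d0 :: dd' d0 dt := by
    apply eq_of_pairwise_gt
    · rw [List.pairwise_reverse]
      exact PySem.List.sorted_ofList_pairwise_lt aug
    · exact pairwise_dd' dt d0 hpw
    · intro x
      rw [List.mem_reverse, hasc, PySem.List.mem_sorted, PySem.Set.mem_ofList]
      constructor
      · intro hx
        have : x ∈ d0 :: dt := hperm.mem_iff.mpr hx
        rcases List.mem_cons.mp this with rfl | hx'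
        · exact List.mem_cons_self
        · rcases mem_dd' dt d0 hpw x hx' with rfl | h
          · exact List.mem_cons_self
          · exact List.mem_cons_of_mem _ h
      · intro hx
        apply hperm.mem_iff.mp
        rcases List.mem_cons.mp hx with rfl | hx'
        · exact List.mem_cons_self
        · exact List.mem_cons_of_mem _ (dd'_subset dt d0 x hx')
  rw [hvals]
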